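-- pv_equiv track=rewrite | github.com/jonathan-kofman/aria-os | aria_os/mass_calc.py | _guess_material_from_name
-- ===== SOURCE A (Python) =====
-- def _guess_material_from_name(spec: str) -> str:
--     """Fall-back material guess when BOM doesn't say."""
--     s = spec.lower()
--     if any(k in s for k in ("plate", "arm", "frame")):
--         return "cfrp"
--     if any(k in s for k in ("standoff", "motor", "rail", "eyelet")):
--         return "aluminum_6061"
--     if "battery" in s:
--         return "lipo_4s"
--     if "armor" in s:
--         return "aramid"
--     if any(k in s for k in ("pcb", "fc_", "esc_")):
--         return "fr4"
--     if any(k in s for k in ("canopy", "spool", "pod", "module", "puck")):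
--         return "petg"
--     return "default"
-- ===== SOURCE B (Python) =====
-- _KEYWORDS = [
--     ("plate", 0), ("arm", 0), ("frame", 0),
--     ("standoff", 1), ("motor", 1), ("rail", 1), ("eyelet", 1),
--     ("battery", 2),
--     ("armor", 3),
--     ("pcb", 4), ("fc_", 4), ("esc_", 4),
--     ("canopy", 5), ("spool", 5), ("pod", 5), ("module", 5), ("puck", 5),
-- ]
-- _MATERIALS = {0: "cfrp", 1: "aluminum_6061", 2: "lipo_4s", 3: "aramid", 4: "fr4", 5: "petg"}
--
--
-- def _guess_material_from_name(spec: str) -> str: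
--     """Fall-back material guess when BOM doesn't say."""
--     s = spec.lower()
--     best = 7
--     for i in range(len(s)):
--         for kw, rank in _KEYWORDS:
--             if s.startswith(kw, i):
--                 best = min(best, rank)
--     return _MATERIALS.get(best, "default")
-- ===== Notes on version B (the rewrite author's own statement) =====
-- stated objective: alternative
-- what changed: Instead of testing each rule's keywords with substring membership in cascade order, B makes a single left-to-right scan over the lowercased string, recording at every position the minimum rule rank whose keyword starts there, and maps the overall minimum rank to its material at the end.
import Mathlib
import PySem

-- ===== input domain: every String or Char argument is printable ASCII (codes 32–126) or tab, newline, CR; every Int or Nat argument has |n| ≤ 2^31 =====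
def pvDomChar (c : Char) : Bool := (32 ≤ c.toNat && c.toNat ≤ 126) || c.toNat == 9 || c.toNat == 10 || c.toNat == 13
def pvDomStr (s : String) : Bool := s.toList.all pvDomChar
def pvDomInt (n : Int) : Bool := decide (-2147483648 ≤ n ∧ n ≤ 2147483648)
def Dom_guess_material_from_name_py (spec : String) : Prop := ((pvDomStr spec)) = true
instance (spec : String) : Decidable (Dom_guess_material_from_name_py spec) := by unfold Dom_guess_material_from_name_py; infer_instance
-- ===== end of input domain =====

set_option maxHeartbeats 1000000


-- B replaces A's per-rule substring tests by a single left-to-right scan of the string: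
-- at each position it records the smallest rule rank whose keyword starts there, and maps
-- the overall minimum rank to its material at the end; objective: alternative (same cost).

-- ===== PORT A =====
def guess_material_from_name_py (spec : String) : String :=
  let s := PySem.Str.lower spec
  if (["plate", "arm", "frame"].any fun k => PySem.Str.isIn k s) then "cfrp"
  else if (["standoff", "motor", "rail", "eyelet"].any fun k => PySem.Str.isIn k s) then "aluminum_6061"
  else if PySem.Str.isIn "battery" s then "lipo_4s"
  else if PySem.Str.isIn "armor" s then "aramid"
  else if (["pcb", "fc_", "esc_"].any fun k => PySem.Str.isIn k s) then "fr4"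
  else if (["canopy", "spool", "pod", "module", "puck"].any fun k => PySem.Str.isIn k s) then "petg"
  else "default"

-- ===== PORT B =====
-- _KEYWORDS: (keyword, rank of its rule)
def pvKeywords : List (List Char × Nat) :=
  [ ("plate".toList, 0), ("arm".toList, 0), ("frame".toList, 0),
    ("standoff".toList, 1), ("motor".toList, 1), ("rail".toList, 1), ("eyelet".toList, 1),
    ("battery".toList, 2),
    ("armor".toList, 3),
    ("pcb".toList, 4), ("fc_".toList, 4), ("esc_".toList, 4),
    ("canopy".toList, 5), ("spool".toList, 5), ("pod".toList, 5),
    ("module".toList, 5), ("puck".toList, 5) ]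

-- _MATERIALS
def pvMaterials : PySem.Dict Nat String :=
  PySem.Dict.ofList [(0, "cfrp"), (1, "aluminum_6061"), (2, "lipo_4s"),
                     (3, "aramid"), (4, "fr4"), (5, "petg")]

-- Python's s.startswith(kw, i) (0 ≤ i) is 'kw is a prefix of s from position i':
-- ported exactly as PySem.Chars.startswith (s.drop i) kw.
def guess_material_from_name_py_alt (spec : String) : String :=
  let s := (PySem.Str.lower spec).toList
  let best := (List.range s.length).foldl
    (fun b i => pvKeywords.foldl
      (fun b kr => if PySem.Chars.startswith (s.drop i) kr.1 then min b kr.2 else b) b) 7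
  PySem.Dict.getD pvMaterials best "default"

-- ===== PRECONDITION & SPEC =====
def Spec_guess_material_from_name_py (spec : String) (out : String) : Prop := out = guess_material_from_name_py_alt spec
instance (spec : String) (out : String) : Decidable (Spec_guess_material_from_name_py spec out) := by unfold Spec_guess_material_from_name_py; infer_instance

-- ===== CLAIM (what is proved, stated in full; the proofs are below) =====
def Claim_equal_guess_material_from_name_py : Prop := ∀ (spec : String), Dom_guess_material_from_name_py spec → Spec_guess_material_from_name_py spec (guess_material_from_name_py spec)

-- ===== LEMMAS AND PROOFS =====

-- the multiset of ranks matched anywhere in t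
def pvMatchedRanks (t : List Char) : List Nat :=
  (List.range t.length).flatMap fun i =>
    pvKeywords.filterMap fun kr =>
      if PySem.Chars.startswith (t.drop i) kr.1 then some kr.2 else none

theorem pv_foldl_if_min_eq_filterMap {α : Type} (l : List α) (c : α → Bool) (r : α → Nat) :
    ∀ b : Nat, l.foldl (fun b x => if c x then min b (r x) else b) b
      = (l.filterMap fun x => if c x then some (r x) else none).foldl min b := by
  induction l with
  | nil => intro b; rfl
  | cons x l ih =>
    intro b
    by_cases h : c x = true <;> simp [List.foldl, h, ih]

theorem pv_foldl_foldl_min_eq_flatMap {α : Type} (l : List α) (g : α → List Nat) :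
    ∀ b : Nat, l.foldl (fun b x => (g x).foldl min b) b = (l.flatMap g).foldl min b := by
  induction l with
  | nil => intro b; rfl
  | cons x l ih => intro b; simp [List.foldl, ih, List.foldl_append]

theorem pv_foldl_min_of_le (l : List Nat) : ∀ b : Nat, (∀ x ∈ l, b ≤ x) → l.foldl min b = b := by
  induction l with
  | nil => intro b _; rfl
  | cons x l ih =>
    intro b h
    have hbx : min b x = b := min_eq_left (h x (by simp))
    simp only [List.foldl, hbx]
    exact ih b fun y hy => h y (by simp [hy])

theorem pv_foldl_min_eq_of_mem (l : List Nat) :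
    ∀ b r, r ∈ l → (∀ x ∈ l, r ≤ x) → r ≤ b → l.foldl min b = r := by
  induction l with
  | nil => intro b r h; simp at h
  | cons x l ih =>
    intro b r hmem hlb hrb
    rcases List.mem_cons.mp hmem with h | h
    · subst h
      by_cases hrl : r ∈ l
      · exact ih (min b r) r hrl (fun y hy => hlb y (by simp [hy])) (le_min hrb le_rfl)
      · have : min b r = r := min_eq_right hrb
        simp only [List.foldl, this]
        exact pv_foldl_min_of_le l r (fun y hy => hlb y (by simp [hy]))
    · exact ih (min b x) r h (fun y hy => hlb y (by simp [hy]))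
        (le_min hrb (hlb x (by simp)))

theorem pv_best_eq_foldl_min (t : List Char) :
    ((List.range t.length).foldl
      (fun b i => pvKeywords.foldl
        (fun b kr => if PySem.Chars.startswith (t.drop i) kr.1 then min b kr.2 else b) b) 7)
      = (pvMatchedRanks t).foldl min 7 := by
  unfold pvMatchedRanks
  rw [← pv_foldl_foldl_min_eq_flatMap]
  have hfun : (fun (b : Nat) (i : Nat) => pvKeywords.foldl
        (fun b kr => if PySem.Chars.startswith (t.drop i) kr.1 then min b kr.2 else b) b)
      = fun (b : Nat) (i : Nat) =>
        ((pvKeywords.filterMap fun kr =>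
          if PySem.Chars.startswith (t.drop i) kr.1 then some kr.2 else none).foldl min b) := by
    funext b i
    exact pv_foldl_if_min_eq_filterMap pvKeywords _ _ b
  rw [hfun]

-- membership in pvMatchedRanks ↔ some keyword of that rank occurs in t
theorem pv_mem_matchedRanks (t : List Char) (r : Nat) :
    r ∈ pvMatchedRanks t ↔ ∃ kw, (kw, r) ∈ pvKeywords ∧ PySem.Chars.isIn kw t = true := by
  unfold pvMatchedRanks
  simp only [List.mem_flatMap, List.mem_range, List.mem_filterMap]
  constructor
  · rintro ⟨i, hi, ⟨kw, rk⟩, hmem, hif⟩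
    by_cases hc : PySem.Chars.startswith (t.drop i) kw = true
    · simp [hc] at hif
      subst hif
      refine ⟨kw, hmem, ?_⟩
      rw [← PySem.Chars.exists_prefix_drop_iff_isIn]
      exact ⟨i, (PySem.Chars.startswith_iff _ _).mp hc⟩
    · simp [hc] at hif
  · rintro ⟨kw, hmem, hin⟩
    rw [← PySem.Chars.exists_prefix_drop_iff_isIn] at hin
    obtain ⟨j, hpre⟩ := hin
    have hkw : kw ≠ [] := by
      simp only [pvKeywords, List.mem_cons, List.not_mem_nil, or_false, Prod.mk.injEq] at hmem
      rcases hmem with ⟨h, -⟩ | ⟨h, -⟩ | ⟨h, -⟩ | ⟨h, -⟩ | ⟨h, -⟩ | ⟨h, -⟩ | ⟨h, -⟩ | ⟨h, -⟩ |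
        ⟨h, -⟩ | ⟨h, -⟩ | ⟨h, -⟩ | ⟨h, -⟩ | ⟨h, -⟩ | ⟨h, -⟩ | ⟨h, -⟩ | ⟨h, -⟩ | ⟨h, -⟩ <;>
        subst h <;> decide
    have hj : j < t.length := by
      by_contra hge
      have : t.drop j = [] := List.drop_eq_nil_of_le (by omega)
      rw [this, List.prefix_nil] at hpre
      exact hkw hpre
    exact ⟨j, hj, (kw, r), hmem, by simp [(PySem.Chars.startswith_iff _ _).mpr hpre]⟩

-- every matched rank names a group whose keyword occurs in t
theorem pv_mem_cases (t : List Char) (x : Nat) (hx : x ∈ pvMatchedRanks t) :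
    (x = 0 ∧ (PySem.Chars.isIn "plate".toList t = true ∨ PySem.Chars.isIn "arm".toList t = true ∨ PySem.Chars.isIn "frame".toList t = true)) ∨
    (x = 1 ∧ (PySem.Chars.isIn "standoff".toList t = true ∨ PySem.Chars.isIn "motor".toList t = true ∨ PySem.Chars.isIn "rail".toList t = true ∨ PySem.Chars.isIn "eyelet".toList t = true)) ∨
    (x = 2 ∧ (PySem.Chars.isIn "battery".toList t = true)) ∨
    (x = 3 ∧ (PySem.Chars.isIn "armor".toList t = true)) ∨
    (x = 4 ∧ (PySem.Chars.isIn "pcb".toList t = true ∨ PySem.Chars.isIn "fc_".toList t = true ∨ PySem.Chars.isIn "esc_".toList t = true)) ∨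
    (x = 5 ∧ (PySem.Chars.isIn "canopy".toList t = true ∨ PySem.Chars.isIn "spool".toList t = true ∨ PySem.Chars.isIn "pod".toList t = true ∨ PySem.Chars.isIn "module".toList t = true ∨ PySem.Chars.isIn "puck".toList t = true)) := by
  obtain ⟨kw, hmem, hin⟩ := (pv_mem_matchedRanks t x).mp hx
  simp only [pvKeywords, List.mem_cons, List.not_mem_nil, or_false, Prod.mk.injEq] at hmem
  rcases hmem with ⟨hk, hv⟩ | ⟨hk, hv⟩ | ⟨hk, hv⟩ | ⟨hk, hv⟩ | ⟨hk, hv⟩ | ⟨hk, hv⟩ | ⟨hk, hv⟩ |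
    ⟨hk, hv⟩ | ⟨hk, hv⟩ | ⟨hk, hv⟩ | ⟨hk, hv⟩ | ⟨hk, hv⟩ | ⟨hk, hv⟩ | ⟨hk, hv⟩ | ⟨hk, hv⟩ |
    ⟨hk, hv⟩ | ⟨hk, hv⟩ <;> subst hk <;> subst hv <;> simp at hin ⊢ <;> tauto

-- the minimum matched rank picks exactly the first rule of A's cascade that fires
theorem pv_chars_eq (t : List Char) :
    PySem.Dict.getD pvMaterials ((pvMatchedRanks t).foldl min 7) "default"
      = (if (["plate".toList, "arm".toList, "frame".toList].any fun k => PySem.Chars.isIn k t) then "cfrp"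
        else if (["standoff".toList, "motor".toList, "rail".toList, "eyelet".toList].any fun k => PySem.Chars.isIn k t) then "aluminum_6061"
        else if PySem.Chars.isIn "battery".toList t then "lipo_4s"
        else if PySem.Chars.isIn "armor".toList t then "aramid"
        else if (["pcb".toList, "fc_".toList, "esc_".toList].any fun k => PySem.Chars.isIn k t) then "fr4"
        else if (["canopy".toList, "spool".toList, "pod".toList, "module".toList, "puck".toList].any fun k => PySem.Chars.isIn k t) then "petg"
        else "default") := by
  split_ifs with h0 h1 h2 h3 h4 h5
  all_goals simp only [List.any_cons, List.any_nil, Bool.or_eq_true, Bool.or_false] at *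
  -- each case: the fired rank is a member and a lower bound of pvMatchedRanks t
  · have hr : (0 : Nat) ∈ pvMatchedRanks t := by
      rcases h0 with h | h | h
      · exact (pv_mem_matchedRanks t 0).mpr ⟨"plate".toList, by decide, h⟩
      · exact (pv_mem_matchedRanks t 0).mpr ⟨"arm".toList, by decide, h⟩
      · exact (pv_mem_matchedRanks t 0).mpr ⟨"frame".toList, by decide, h⟩
    have hlb : ∀ x ∈ pvMatchedRanks t, 0 ≤ x := fun x _ => Nat.zero_le x
    rw [pv_foldl_min_eq_of_mem _ 7 0 hr hlb (by omega)]; rfl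
  · have hr : (1 : Nat) ∈ pvMatchedRanks t := by
      rcases h1 with h | h | h | h
      · exact (pv_mem_matchedRanks t 1).mpr ⟨"standoff".toList, by decide, h⟩
      · exact (pv_mem_matchedRanks t 1).mpr ⟨"motor".toList, by decide, h⟩
      · exact (pv_mem_matchedRanks t 1).mpr ⟨"rail".toList, by decide, h⟩
      · exact (pv_mem_matchedRanks t 1).mpr ⟨"eyelet".toList, by decide, h⟩
    have hlb : ∀ x ∈ pvMatchedRanks t, 1 ≤ x := by
      intro x hx
      rcases pv_mem_cases t x hx with ⟨hv, hi⟩ | ⟨hv, hi⟩ | ⟨hv, hi⟩ | ⟨hv, hi⟩ | ⟨hv, hi⟩ | ⟨hv, hi⟩ <;>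
        subst hv <;> first | omega | tauto
    rw [pv_foldl_min_eq_of_mem _ 7 1 hr hlb (by omega)]; rfl
  · have hr : (2 : Nat) ∈ pvMatchedRanks t := by
      exact (pv_mem_matchedRanks t 2).mpr ⟨"battery".toList, by decide, h2⟩
    have hlb : ∀ x ∈ pvMatchedRanks t, 2 ≤ x := by
      intro x hx
      rcases pv_mem_cases t x hx with ⟨hv, hi⟩ | ⟨hv, hi⟩ | ⟨hv, hi⟩ | ⟨hv, hi⟩ | ⟨hv, hi⟩ | ⟨hv, hi⟩ <;>
        subst hv <;> first | omega | tauto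
    rw [pv_foldl_min_eq_of_mem _ 7 2 hr hlb (by omega)]; rfl
  · have hr : (3 : Nat) ∈ pvMatchedRanks t := by
      exact (pv_mem_matchedRanks t 3).mpr ⟨"armor".toList, by decide, h3⟩
    have hlb : ∀ x ∈ pvMatchedRanks t, 3 ≤ x := by
      intro x hx
      rcases pv_mem_cases t x hx with ⟨hv, hi⟩ | ⟨hv, hi⟩ | ⟨hv, hi⟩ | ⟨hv, hi⟩ | ⟨hv, hi⟩ | ⟨hv, hi⟩ <;>
        subst hv <;> first | omega | tauto
    rw [pv_foldl_min_eq_of_mem _ 7 3 hr hlb (by omega)]; rfl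
  · have hr : (4 : Nat) ∈ pvMatchedRanks t := by
      rcases h4 with h | h | h
      · exact (pv_mem_matchedRanks t 4).mpr ⟨"pcb".toList, by decide, h⟩
      · exact (pv_mem_matchedRanks t 4).mpr ⟨"fc_".toList, by decide, h⟩
      · exact (pv_mem_matchedRanks t 4).mpr ⟨"esc_".toList, by decide, h⟩
    have hlb : ∀ x ∈ pvMatchedRanks t, 4 ≤ x := by
      intro x hx
      rcases pv_mem_cases t x hx with ⟨hv, hi⟩ | ⟨hv, hi⟩ | ⟨hv, hi⟩ | ⟨hv, hi⟩ | ⟨hv, hi⟩ | ⟨hv, hi⟩ <;>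
        subst hv <;> first | omega | tauto
    rw [pv_foldl_min_eq_of_mem _ 7 4 hr hlb (by omega)]; rfl
  · have hr : (5 : Nat) ∈ pvMatchedRanks t := by
      rcases h5 with h | h | h | h | h
      · exact (pv_mem_matchedRanks t 5).mpr ⟨"canopy".toList, by decide, h⟩
      · exact (pv_mem_matchedRanks t 5).mpr ⟨"spool".toList, by decide, h⟩
      · exact (pv_mem_matchedRanks t 5).mpr ⟨"pod".toList, by decide, h⟩
      · exact (pv_mem_matchedRanks t 5).mpr ⟨"module".toList, by decide, h⟩
      · exact (pv_mem_matchedRanks t 5).mpr ⟨"puck".toList, by decide, h⟩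
    have hlb : ∀ x ∈ pvMatchedRanks t, 5 ≤ x := by
      intro x hx
      rcases pv_mem_cases t x hx with ⟨hv, hi⟩ | ⟨hv, hi⟩ | ⟨hv, hi⟩ | ⟨hv, hi⟩ | ⟨hv, hi⟩ | ⟨hv, hi⟩ <;>
        subst hv <;> first | omega | tauto
    rw [pv_foldl_min_eq_of_mem _ 7 5 hr hlb (by omega)]; rfl
  · have hnil : pvMatchedRanks t = [] := by
      rw [List.eq_nil_iff_forall_not_mem]
      intro x hx
      rcases pv_mem_cases t x hx with ⟨hv, hi⟩ | ⟨hv, hi⟩ | ⟨hv, hi⟩ | ⟨hv, hi⟩ | ⟨hv, hi⟩ | ⟨hv, hi⟩ <;>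
        subst hv <;> first | omega | tauto
    rw [hnil]; rfl


-- ===== VERDICT (by name: the statement is the Claim_ definition above) =====
theorem guess_material_from_name_py_spec : Claim_equal_guess_material_from_name_py := by
  intro spec _
  unfold Spec_guess_material_from_name_py
  have hB : guess_material_from_name_py_alt spec
      = PySem.Dict.getD pvMaterials
          ((List.range ((PySem.Str.lower spec).toList).length).foldl
            (fun b i => pvKeywords.foldl
              (fun b kr => if PySem.Chars.startswith (((PySem.Str.lower spec).toList).drop i) kr.1
                then min b kr.2 else b) b) 7) "default" := rfl
  have hA : guess_material_from_name_py spec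
      = (if (["plate", "arm", "frame"].any fun k => PySem.Str.isIn k (PySem.Str.lower spec)) then "cfrp"
        else if (["standoff", "motor", "rail", "eyelet"].any fun k => PySem.Str.isIn k (PySem.Str.lower spec)) then "aluminum_6061"
        else if PySem.Str.isIn "battery" (PySem.Str.lower spec) then "lipo_4s"
        else if PySem.Str.isIn "armor" (PySem.Str.lower spec) then "aramid"
        else if (["pcb", "fc_", "esc_"].any fun k => PySem.Str.isIn k (PySem.Str.lower spec)) then "fr4"
        else if (["canopy", "spool", "pod", "module", "puck"].any fun k => PySem.Str.isIn k (PySem.Str.lower spec)) then "petg"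
        else "default") := rfl
  rw [hA, hB, pv_best_eq_foldl_min, pv_chars_eq]
  simp [PySem.Str.isIn_eq, List.any_cons, List.any_nil]
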